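-- pv_equiv track=rewrite | github.com/razielsiegman/dataScienceApplied | hw2/nqueen.py | highestConflict
-- ===== SOURCE A (Python) =====
-- def conflict(row_a, column_a, row_b, column_b):
--   if(row_a == row_b):
--     return True
--   if(column_a == column_b):
--     return True
--   if(abs(column_a - column_b) == abs(row_a - row_b)):
--     return True
--   return False
--
-- def highestConflict(columns):
--   highest_index = -1
--   highest_count = 0
--   for index_i, i in enumerate(columns):
--     curr = 0
--     for index_j, j in enumerate(columns):
--       if index_i != index_j:
--         if(conflict(index_i, i, index_j, j)):
--           curr += 1
--           if(curr >= highest_count):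
--             highest_count = curr
--             highest_index = index_i
--   return highest_index, highest_count
-- ===== SOURCE B (Python) =====
-- def highestConflict(columns):
--     col_cnt = {}
--     diag_cnt = {}
--     anti_cnt = {}
--     for i, c in enumerate(columns):
--         col_cnt[c] = col_cnt.get(c, 0) + 1
--         diag_cnt[i - c] = diag_cnt.get(i - c, 0) + 1
--         anti_cnt[i + c] = anti_cnt.get(i + c, 0) + 1
--     highest_index = -1
--     highest_count = 0
--     for i, c in enumerate(columns):
--         cnt = col_cnt[c] + diag_cnt[i - c] + anti_cnt[i + c] - 3
--         if cnt > 0 and cnt >= highest_count: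
--             highest_index = i
--             highest_count = cnt
--     return highest_index, highest_count
-- ===== Notes on version B (the rewrite author's own statement) =====
-- stated objective: faster
-- what changed: Replaces the all-pairs double loop with one pass that builds occupancy counters for columns, diagonals and anti-diagonals, so each queen's conflict count is three dict lookups instead of an inner scan.
import Mathlib
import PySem

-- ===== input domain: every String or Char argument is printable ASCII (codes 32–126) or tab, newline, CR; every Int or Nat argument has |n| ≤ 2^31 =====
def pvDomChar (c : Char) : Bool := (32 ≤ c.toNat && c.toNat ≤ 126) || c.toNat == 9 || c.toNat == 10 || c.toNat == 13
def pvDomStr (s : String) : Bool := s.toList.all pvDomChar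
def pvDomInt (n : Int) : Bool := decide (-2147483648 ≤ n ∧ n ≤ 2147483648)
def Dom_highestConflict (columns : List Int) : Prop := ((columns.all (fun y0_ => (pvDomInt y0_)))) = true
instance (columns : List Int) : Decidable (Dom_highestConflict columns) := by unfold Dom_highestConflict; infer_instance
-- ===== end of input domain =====

-- B replaces A's all-pairs double loop by dict counters for column/diagonal/anti-diagonal occupancy,
-- deriving each queen's conflict count from three lookups (objective: faster).

-- ===== PORT A =====
def conflict (row_a column_a row_b column_b : Int) : Bool :=
  if row_a == row_b then true
  else if column_a == column_b then true
  else if (column_a - column_b).natAbs == (row_a - row_b).natAbs then true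
  else false

def highestConflict (columns : List Int) : Int × Int :=
  (PySem.List.enumerate columns).foldl
    (fun (st : Int × Int) (pi : Int × Int) =>
      let inner := (PySem.List.enumerate columns).foldl
        (fun (s : Int × Int × Int) (pj : Int × Int) =>
          if pi.1 != pj.1 then
            if conflict pi.1 pi.2 pj.1 pj.2 then
              let c := s.2.2 + 1
              if s.2.1 ≤ c then (pi.1, c, c) else (s.1, s.2.1, c)
            else s
          else s)
        (st.1, st.2, 0)
      (inner.1, inner.2.1))
    (-1, 0)

-- ===== PORT B =====
-- Source B's col_cnt[c] / diag_cnt[i-c] / anti_cnt[i+c] lookups always hit a present key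
-- (the dicts were built from the same enumerated list), so Dict.getD is exact here.
def highestConflict_alt (columns : List Int) : Int × Int :=
  let cnts := (PySem.List.enumerate columns).foldl
    (fun (d : PySem.Dict Int Int × PySem.Dict Int Int × PySem.Dict Int Int) (p : Int × Int) =>
      (d.1.insert p.2 (d.1.getD p.2 0 + 1),
       d.2.1.insert (p.1 - p.2) (d.2.1.getD (p.1 - p.2) 0 + 1),
       d.2.2.insert (p.1 + p.2) (d.2.2.getD (p.1 + p.2) 0 + 1)))
    (PySem.Dict.empty, PySem.Dict.empty, PySem.Dict.empty)
  (PySem.List.enumerate columns).foldl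
    (fun (st : Int × Int) (p : Int × Int) =>
      let cnt := cnts.1.getD p.2 0 + cnts.2.1.getD (p.1 - p.2) 0 + cnts.2.2.getD (p.1 + p.2) 0 - 3
      if 0 < cnt ∧ st.2 ≤ cnt then (p.1, cnt) else st)
    (-1, 0)

-- ===== PRECONDITION & SPEC =====
def Spec_highestConflict (columns : List Int) (out : Int × Int) : Prop := out = highestConflict_alt columns
instance (columns : List Int) (out : Int × Int) : Decidable (Spec_highestConflict columns out) := by unfold Spec_highestConflict; infer_instance

-- ===== CLAIM (what is proved, stated in full; the proofs are below) =====
def Claim_equal_highestConflict : Prop := ∀ (columns : List Int), Dom_highestConflict columns → Spec_highestConflict columns (highestConflict columns)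

-- ===== LEMMAS AND PROOFS =====

-- conflicting partners of queen (i, ci): enumerated pairs with a different index that conflict
def pvPred (i ci : Int) (q : Int × Int) : Bool := (i != q.1) && conflict i ci q.1 q.2

-- characterization of A's inner loop: final state from the pair count alone
lemma inner_fold_eq (i ci : Int) (l : List (Int × Int)) (hi hc curr : Int) :
    l.foldl (fun (s : Int × Int × Int) (pj : Int × Int) =>
        if i != pj.1 then
          if conflict i ci pj.1 pj.2 then
            let c := s.2.2 + 1
            if s.2.1 ≤ c then (i, c, c) else (s.1, s.2.1, c)
          else s
        else s) (hi, hc, curr)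
    = (if 1 ≤ (l.countP (pvPred i ci) : Int) ∧ hc ≤ curr + (l.countP (pvPred i ci) : Int)
       then (i, curr + (l.countP (pvPred i ci) : Int), curr + (l.countP (pvPred i ci) : Int))
       else (hi, hc, curr + (l.countP (pvPred i ci) : Int))) := by
  induction l generalizing hi hc curr with
  | nil => simp
  | cons x xs ih =>
    rw [List.foldl_cons, List.countP_cons]
    by_cases hP : pvPred i ci x = true
    · have h1 : (i != x.1) = true := by
        simp only [pvPred, Bool.and_eq_true] at hP; exact hP.1
      have h2 : conflict i ci x.1 x.2 = true := by
        simp only [pvPred, Bool.and_eq_true] at hP; exact hP.2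
      rw [hP]
      simp only [h1, h2, if_true]
      have hcast : ((xs.countP (pvPred i ci) + 1 : Nat) : Int) = (xs.countP (pvPred i ci) : Int) + 1 := by
        push_cast; ring
      rw [hcast]
      by_cases hcond : hc ≤ curr + 1
      · rw [if_pos hcond, ih]
        split_ifs <;> simp only [Prod.mk.injEq, true_and] <;> omega
      · rw [if_neg hcond, ih]
        split_ifs <;> simp only [Prod.mk.injEq, true_and] <;> omega
    · have hP0 : pvPred i ci x = false := by simpa using hP
      have hb : ((i != x.1) = false) ∨ (conflict i ci x.1 x.2 = false) := by
        by_cases hxx : i = x.1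
        · exact Or.inl (by simp [hxx])
        · exact Or.inr (by simpa [pvPred, hxx] using hP0)
      have hstep2 : (if (i != x.1) = true then
          if conflict i ci x.1 x.2 = true then
            let c := ((hi, hc, curr) : Int × Int × Int).2.2 + 1
            if (hi, hc, curr).2.1 ≤ c then (i, c, c) else ((hi, hc, curr).1, (hi, hc, curr).2.1, c)
          else (hi, hc, curr)
        else (hi, hc, curr)) = ((hi, hc, curr) : Int × Int × Int) := by
        rcases hb with h | h <;> simp [h]
      rw [hstep2, ih, hP0]
      simp

-- a counting fold on a dict yields list counts
lemma getD_count_fold (f : Int × Int → Int) (l : List (Int × Int)) (d : PySem.Dict Int Int) (v : Int) :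
    (l.foldl (fun d p => d.insert (f p) (d.getD (f p) 0 + 1)) d).getD v 0
      = d.getD v 0 + ((l.map f).count v : Int) := by
  induction l generalizing d with
  | nil => simp
  | cons x xs ih =>
    simp only [List.foldl_cons, ih, List.map_cons, List.count_cons]
    rw [PySem.Dict.getD_insert]
    by_cases h : v = f x
    · simp only [h, if_true, beq_self_eq_true]; push_cast; ring
    · simp [h, beq_iff_eq, Ne.symm h]

-- a fold with componentwise step is the triple of folds
lemma foldl_triple {α β γ δ : Type} (l : List δ) (g1 : α → δ → α) (g2 : β → δ → β) (g3 : γ → δ → γ)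
    (a : α) (b : β) (c : γ) :
    l.foldl (fun s p => (g1 s.1 p, g2 s.2.1 p, g3 s.2.2 p)) (a, b, c)
      = (l.foldl g1 a, l.foldl g2 b, l.foldl g3 c) := by
  induction l generalizing a b c with
  | nil => rfl
  | cons x xs ih => simp [List.foldl_cons, ih]

lemma countP_or_disjoint {α : Type} (l : List α) (p q : α → Bool) (h : ∀ x ∈ l, ¬(p x = true ∧ q x = true)) :
    l.countP (fun x => p x || q x) = l.countP p + l.countP q := by
  induction l with
  | nil => simp
  | cons x xs ih =>
    have hx := h x (by simp)
    have ih' := ih (fun y hy => h y (by simp [hy]))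
    simp only [List.countP_cons, ih']
    cases hp : p x <;> cases hq : q x <;> simp_all <;> omega

-- conflict, for distinct rows, is exactly column / diagonal / anti-diagonal coincidence
lemma conflict_iff (i ci j cj : Int) (h : i ≠ j) :
    conflict i ci j cj = ((cj == ci) || ((j - cj) == (i - ci)) || ((j + cj) == (i + ci))) := by
  rw [Bool.eq_iff_iff]
  simp only [conflict, beq_iff_eq, Bool.or_eq_true]
  rw [if_neg (by simpa using h)]
  constructor
  · intro hc
    split_ifs at hc with h1 h2
    · left; omega
    · rw [Int.natAbs_eq_natAbs_iff] at h2; omega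
  · intro hd
    split_ifs with h1 h2
    · rfl
    · rfl
    · exfalso; rw [Int.natAbs_eq_natAbs_iff] at h2; omega

-- dropping the one element that satisfies b from a count of Q (b implies Q on l)
lemma countP_minus_one {α : Type} (l : List α) (Q : α → Bool) (b : α → Bool)
    (hone : l.countP b = 1) (himp : ∀ x ∈ l, b x = true → Q x = true) :
    l.countP (fun x => !b x && Q x) = l.countP Q - 1 ∧ 1 ≤ l.countP Q := by
  have hsplit : l.countP Q = l.countP (fun x => b x && Q x) + l.countP (fun x => !b x && Q x) := by
    rw [← countP_or_disjoint l (fun x => b x && Q x) (fun x => !b x && Q x)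
      (by intro x _ hx; rcases hx with ⟨h1, h2⟩; cases hb : b x <;> simp [hb] at h1 h2)]
    apply List.countP_congr
    intro x _; cases hb : b x <;> cases hq : Q x <;> simp [*]
  have hb1 : l.countP (fun x => b x && Q x) = 1 := by
    rw [← hone]; apply List.countP_congr
    intro x hx; cases hb : b x
    · simp [*]
    · simp [*, himp x hx hb]
  omega

-- the key identity: A's per-queen pair count = the three occupancy counts − 3
lemma count_eq (columns : List Int) (i ci : Int) (hmem : (i, ci) ∈ PySem.List.enumerate columns) :
    ((PySem.List.enumerate columns).countP (pvPred i ci) : Int)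
      = (((PySem.List.enumerate columns).map (fun q => q.2)).count ci : Int)
        + (((PySem.List.enumerate columns).map (fun q => q.1 - q.2)).count (i - ci) : Int)
        + (((PySem.List.enumerate columns).map (fun q => q.1 + q.2)).count (i + ci) : Int) - 3 := by
  set e := PySem.List.enumerate columns with he
  have hnodup : (e.map (fun q => q.1)).Nodup := by
    rw [he, PySem.List.map_fst_enumerate]; exact PySem.List.nodup_pyRange_one 0 (0 + columns.length)
  have hinj : ∀ q ∈ e, q.1 = i → q = (i, ci) := by
    intro q hq hq1
    exact List.inj_on_of_nodup_map hnodup hq hmem hq1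
  have hone : e.countP (fun q => q.1 == i) = 1 := by
    have : (e.map (fun q => q.1)).count i = 1 :=
      List.count_eq_one_of_mem hnodup (by exact List.mem_map.mpr ⟨(i, ci), hmem, rfl⟩)
    rw [List.count, List.countP_map] at this
    simpa using this
  set Q1 : Int × Int → Bool := fun q => q.2 == ci with hQ1
  set Q2 : Int × Int → Bool := fun q => q.1 - q.2 == i - ci with hQ2
  set Q3 : Int × Int → Bool := fun q => q.1 + q.2 == i + ci with hQ3
  have hb : ∀ q : Int × Int, (i != q.1) = !(q.1 == i) := by
    intro q; cases hq : (q.1 == i) <;> simp_all [bne, Bool.beq_comm]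
  have hstep1 : e.countP (pvPred i ci)
      = e.countP (fun q => (!(q.1 == i) && Q1 q) || (!(q.1 == i) && Q2 q) || (!(q.1 == i) && Q3 q)) := by
    apply List.countP_congr
    intro q _
    by_cases hqi : i = q.1
    · simp [pvPred, hqi, hQ1, hQ2, hQ3]
    · rw [pvPred, conflict_iff i ci q.1 q.2 hqi, hb q]
      cases hq : (q.1 == i)
      · simp [Bool.and_or_distrib_left, hQ1, hQ2, hQ3]
      · simp_all
  have hd12 : ∀ q : Int × Int, ¬((!(q.1 == i) && Q1 q) = true ∧ (!(q.1 == i) && Q2 q) = true) := by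
    intro q ⟨h1, h2⟩
    simp only [hQ1, hQ2, Bool.and_eq_true, Bool.not_eq_true', beq_eq_false_iff_ne, beq_iff_eq, ne_eq] at h1 h2
    exact h1.1 (by omega)
  have hd13 : ∀ q : Int × Int, ¬(((!(q.1 == i) && Q1 q) || (!(q.1 == i) && Q2 q)) = true ∧ (!(q.1 == i) && Q3 q) = true) := by
    intro q ⟨h1, h2⟩
    simp only [hQ1, hQ2, hQ3, Bool.or_eq_true, Bool.and_eq_true, Bool.not_eq_true', beq_eq_false_iff_ne, beq_iff_eq, ne_eq] at h1 h2
    rcases h1 with h1 | h1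
    · exact h1.1 (by omega)
    · exact h1.1 (by omega)
  have hsum : e.countP (fun q => (!(q.1 == i) && Q1 q) || (!(q.1 == i) && Q2 q) || (!(q.1 == i) && Q3 q))
      = e.countP (fun q => !(q.1 == i) && Q1 q) + e.countP (fun q => !(q.1 == i) && Q2 q)
        + e.countP (fun q => !(q.1 == i) && Q3 q) := by
    rw [countP_or_disjoint e _ _ (fun x _ => hd13 x), countP_or_disjoint e _ _ (fun x _ => hd12 x)]
  have h1 : e.countP (fun q => !(q.1 == i) && Q1 q) = e.countP Q1 - 1 ∧ 1 ≤ e.countP Q1 :=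
    countP_minus_one e Q1 (fun q => q.1 == i) hone
      (by intro q hq hbq; rw [show q = (i, ci) from hinj q hq (by simpa using hbq)]; simp [hQ1])
  have h2 : e.countP (fun q => !(q.1 == i) && Q2 q) = e.countP Q2 - 1 ∧ 1 ≤ e.countP Q2 :=
    countP_minus_one e Q2 (fun q => q.1 == i) hone
      (by intro q hq hbq; rw [show q = (i, ci) from hinj q hq (by simpa using hbq)]; simp [hQ2])
  have h3 : e.countP (fun q => !(q.1 == i) && Q3 q) = e.countP Q3 - 1 ∧ 1 ≤ e.countP Q3 :=
    countP_minus_one e Q3 (fun q => q.1 == i) hone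
      (by intro q hq hbq; rw [show q = (i, ci) from hinj q hq (by simpa using hbq)]; simp [hQ3])
  have hc1 : (e.map (fun q => q.2)).count ci = e.countP Q1 := by
    rw [List.count, List.countP_map]; rfl
  have hc2 : (e.map (fun q => q.1 - q.2)).count (i - ci) = e.countP Q2 := by
    rw [List.count, List.countP_map]; rfl
  have hc3 : (e.map (fun q => q.1 + q.2)).count (i + ci) = e.countP Q3 := by
    rw [List.count, List.countP_map]; rfl
  rw [hstep1, hsum, hc1, hc2, hc3]
  omega

-- ===== VERDICT (by name: the statement is the Claim_ definition above) =====
theorem highestConflict_spec : Claim_equal_highestConflict := by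
  intro columns _
  unfold Spec_highestConflict highestConflict highestConflict_alt
  rw [foldl_triple (PySem.List.enumerate columns)
    (fun (d : PySem.Dict Int Int) (p : Int × Int) => d.insert p.2 (d.getD p.2 0 + 1))
    (fun (d : PySem.Dict Int Int) (p : Int × Int) => d.insert (p.1 - p.2) (d.getD (p.1 - p.2) 0 + 1))
    (fun (d : PySem.Dict Int Int) (p : Int × Int) => d.insert (p.1 + p.2) (d.getD (p.1 + p.2) 0 + 1))
    PySem.Dict.empty PySem.Dict.empty PySem.Dict.empty]
  apply PySem.List.foldl_congr_mem
  intro st p hp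
  rw [inner_fold_eq p.1 p.2 (PySem.List.enumerate columns) st.1 st.2 0]
  rw [getD_count_fold (fun q => q.2), getD_count_fold (fun q => q.1 - q.2), getD_count_fold (fun q => q.1 + q.2)]
  simp only [PySem.Dict.getD_empty, zero_add]
  have hKC := count_eq columns p.1 p.2 (by simpa using hp)
  rw [← hKC]
  split_ifs with hA hB hB <;> simp only [Prod.mk.injEq] <;> omega
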